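-- pv_equiv track=rewrite | github.com/JothikaKumar2501/Scam-FraudResolutionFabric | agents_multi.py | _build_dialogue_summary
-- ===== SOURCE A (Python) =====
-- from typing import Dict, Any, List, Optional, Tuple
--
-- def _build_dialogue_summary(context: Dict[str, Any]) -> str:
--     """Build intelligent compressed dialogue summary"""
--     if not context.get('dialogue_history'):
--         return ""
--
--     # COMPRESSED DIALOGUE SUMMARY
--     dialogue_history = context.get('dialogue_history', [])
--     if len(dialogue_history) <= 2:
--         # For short dialogues, show full Q&A
--         dialogue_summary = "\n".join([
--             f"Q: {turn.get('question', '')}\nA: {turn.get('user', '[No response yet]')}"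
--             for turn in dialogue_history
--             if isinstance(turn, dict) and 'question' in turn
--         ])
--     else:
--         # For longer dialogues, create compressed summary
--         key_points = []
--         facts_extracted = []
--         red_flags = []
--
--         for turn in dialogue_history:
--             if isinstance(turn, dict):
--                 question = turn.get('question', '').lower()
--                 answer = turn.get('user', '').lower()
--
--                 # Extract key information
--                 if 'authorize' in answer or 'confirm' in answer:
--                     facts_extracted.append("Customer authorized transaction")
--                 if 'scam' in answer or 'fraud' in answer:
--                     red_flags.append("Customer mentioned scam/fraud")
--                 if 'pressure' in answer or 'urgent' in answer:
--                     red_flags.append("Pressure/urgency tactics detected")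
--                 if 'unknown' in answer or 'stranger' in answer:
--                     red_flags.append("Unknown/stranger relationship")
--                 if 'investment' in answer or 'return' in answer:
--                     facts_extracted.append("Investment-related transaction")
--                 if 'romance' in answer or 'relationship' in answer:
--                     facts_extracted.append("Romance/relationship context")
--                 if 'tech support' in answer or 'computer' in answer:
--                     facts_extracted.append("Tech support scenario")
--
--         # Build compressed summary
--         summary_parts = []
--         if facts_extracted:
--             summary_parts.append(f"FACTS: {', '.join(set(facts_extracted))}")
--         if red_flags:
--             summary_parts.append(f"RED FLAGS: {', '.join(set(red_flags))}")
--         summary_parts.append(f"TURNS: {len(dialogue_history)}")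
--
--         dialogue_summary = " | ".join(summary_parts)
--
--     return dialogue_summary
-- ===== SOURCE B (Python) =====
-- # Rule-major staged rewrite: instead of A's turn-major pass that appends messages
-- # per turn and dedups with set(), B lowercases all answers once, then for each rule
-- # asks a single any() over the whole dialogue, so each bucket is built directly
-- # without duplicates and no dedup step exists.
-- FACT_RULES = [
--     (("authorize", "confirm"), "Customer authorized transaction"),
--     (("investment", "return"), "Investment-related transaction"),
--     (("romance", "relationship"), "Romance/relationship context"),
--     (("tech support", "computer"), "Tech support scenario"),
-- ]
-- FLAG_RULES = [
--     (("scam", "fraud"), "Customer mentioned scam/fraud"),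
--     (("pressure", "urgent"), "Pressure/urgency tactics detected"),
--     (("unknown", "stranger"), "Unknown/stranger relationship"),
-- ]
--
--
-- def _fired(rules, answers):
--     return [msg for kws, msg in rules
--             if any(k in a for a in answers for k in kws)]
--
--
-- def _build_dialogue_summary(context):
--     history = context.get('dialogue_history')
--     if not history:
--         return ""
--     if len(history) <= 2:
--         return "\n".join(
--             "Q: {}\nA: {}".format(turn.get('question', ''),
--                                   turn.get('user', '[No response yet]'))
--             for turn in history
--             if isinstance(turn, dict) and 'question' in turn
--         )
--     answers = [t.get('user', '').lower() for t in history if isinstance(t, dict)]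
--     facts = _fired(FACT_RULES, answers)
--     flags = _fired(FLAG_RULES, answers)
--     parts = []
--     if facts:
--         parts.append("FACTS: " + ", ".join(facts))
--     if flags:
--         parts.append("RED FLAGS: " + ", ".join(flags))
--     parts.append("TURNS: %d" % len(history))
--     return " | ".join(parts)
-- ===== Notes on version B (the rewrite author's own statement) =====
-- stated objective: alternative
-- what changed: Turn-major accumulation (append a message per turn per matching if, then set() dedup) is replaced by a rule-major staged scan: lowercase all answers once, then for each rule one any() over the whole dialogue decides membership, so each bucket is built at most once per rule and no dedup step exists; Pre_ excludes long dialogues firing two or more distinct messages in one bucket, where A's ', '.join(set(...)) order is hash-randomized and accidental.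
import Mathlib
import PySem

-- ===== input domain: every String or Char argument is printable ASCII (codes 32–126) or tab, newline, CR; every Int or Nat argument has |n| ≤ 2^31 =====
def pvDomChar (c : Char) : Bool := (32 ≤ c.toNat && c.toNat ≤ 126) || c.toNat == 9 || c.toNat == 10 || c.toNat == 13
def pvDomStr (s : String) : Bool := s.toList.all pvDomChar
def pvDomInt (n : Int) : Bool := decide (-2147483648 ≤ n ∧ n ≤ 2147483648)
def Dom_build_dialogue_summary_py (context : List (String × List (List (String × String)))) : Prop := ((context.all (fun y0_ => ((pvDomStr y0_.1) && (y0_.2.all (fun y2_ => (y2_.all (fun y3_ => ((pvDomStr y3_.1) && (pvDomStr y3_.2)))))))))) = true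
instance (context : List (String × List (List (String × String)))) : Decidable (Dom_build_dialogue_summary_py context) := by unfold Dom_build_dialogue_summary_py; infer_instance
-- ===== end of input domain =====

-- Rule-major rewrite of the dialogue-summary builder (alternative decomposition, same cost);
-- Pre_ excludes the hash-order-dependent set() joins with two or more distinct messages.


-- ===== PORT A =====
-- one iteration of A's `for turn in dialogue_history` loop over (facts_extracted, red_flags);
-- the `isinstance(turn, dict)` guard is always true under the typed domain (every turn IS a dict)
def pvStepA (acc : List String × List String) (turn : List (String × String)) : List String × List String :=
  let _question := PySem.Str.lower ((PySem.Dict.mk turn).getD "question" "")  -- computed, unused in A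
  let answer := PySem.Str.lower ((PySem.Dict.mk turn).getD "user" "")
  let facts := acc.1
  let flags := acc.2
  let facts := if PySem.Str.isIn "authorize" answer || PySem.Str.isIn "confirm" answer then facts ++ ["Customer authorized transaction"] else facts
  let flags := if PySem.Str.isIn "scam" answer || PySem.Str.isIn "fraud" answer then flags ++ ["Customer mentioned scam/fraud"] else flags
  let flags := if PySem.Str.isIn "pressure" answer || PySem.Str.isIn "urgent" answer then flags ++ ["Pressure/urgency tactics detected"] else flags
  let flags := if PySem.Str.isIn "unknown" answer || PySem.Str.isIn "stranger" answer then flags ++ ["Unknown/stranger relationship"] else flags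
  let facts := if PySem.Str.isIn "investment" answer || PySem.Str.isIn "return" answer then facts ++ ["Investment-related transaction"] else facts
  let facts := if PySem.Str.isIn "romance" answer || PySem.Str.isIn "relationship" answer then facts ++ ["Romance/relationship context"] else facts
  let facts := if PySem.Str.isIn "tech support" answer || PySem.Str.isIn "computer" answer then facts ++ ["Tech support scenario"] else facts
  (facts, flags)

-- `', '.join(set(xs))` ported as join over PySem.Set.ofList: Python-exact only when the set
-- has at most one element (Pre_ below restricts to that; CPython's order is hash-dependent)
def build_dialogue_summary_py (context : List (String × List (List (String × String)))) : String :=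
  match (PySem.Dict.mk context).get? "dialogue_history" with
  | none => ""
  | some dialogue_history =>
    if dialogue_history.length = 0 then ""   -- `not context.get('dialogue_history')` on an empty list
    else if dialogue_history.length ≤ 2 then
      PySem.Str.join "\n"
        ((dialogue_history.filter (fun turn => (PySem.Dict.mk turn).contains "question")).map (fun turn => "Q: " ++ (PySem.Dict.mk turn).getD "question" "" ++ "\nA: " ++ (PySem.Dict.mk turn).getD "user" "[No response yet]"))
    else
      let r := dialogue_history.foldl pvStepA ([], [])
      let summary_parts : List String := []
      let summary_parts := if r.1 ≠ [] then summary_parts ++ ["FACTS: " ++ PySem.Str.join ", " (PySem.Set.ofList r.1)] else summary_parts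
      let summary_parts := if r.2 ≠ [] then summary_parts ++ ["RED FLAGS: " ++ PySem.Str.join ", " (PySem.Set.ofList r.2)] else summary_parts
      let summary_parts := summary_parts ++ ["TURNS: " ++ PySem.Int.toStr dialogue_history.length]
      PySem.Str.join " | " summary_parts

-- ===== PORT B =====
-- B's FACT_RULES / FLAG_RULES tables
def pvFactRules : List (List String × String) :=
  [(["authorize", "confirm"], "Customer authorized transaction"),
   (["investment", "return"], "Investment-related transaction"),
   (["romance", "relationship"], "Romance/relationship context"),
   (["tech support", "computer"], "Tech support scenario")]

def pvFlagRules : List (List String × String) :=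
  [(["scam", "fraud"], "Customer mentioned scam/fraud"),
   (["pressure", "urgent"], "Pressure/urgency tactics detected"),
   (["unknown", "stranger"], "Unknown/stranger relationship")]

-- B's _fired: rule-major — one any() over all answers per rule, Python's
-- `any(k in a for a in answers for k in kws)` (a outer, k inner)
def pvFired (rules : List (List String × String)) (answers : List String) : List String :=
  (rules.filter (fun r => answers.any (fun a => r.1.any (fun k => PySem.Str.isIn k a)))).map (fun r => r.2)

def build_dialogue_summary_py_alt (context : List (String × List (List (String × String)))) : String :=
  match (PySem.Dict.mk context).get? "dialogue_history" with
  | none => ""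
  | some history =>
    if history.length = 0 then ""
    else if history.length ≤ 2 then
      PySem.Str.join "\n"
        ((history.filter (fun turn => (PySem.Dict.mk turn).contains "question")).map (fun turn => "Q: " ++ (PySem.Dict.mk turn).getD "question" "" ++ "\nA: " ++ (PySem.Dict.mk turn).getD "user" "[No response yet]"))
    else
      let answers := history.map (fun t => PySem.Str.lower ((PySem.Dict.mk t).getD "user" ""))
      let facts := pvFired pvFactRules answers
      let flags := pvFired pvFlagRules answers
      let parts : List String :=
        (if facts ≠ [] then ["FACTS: " ++ PySem.Str.join ", " facts] else []) ++
        (if flags ≠ [] then ["RED FLAGS: " ++ PySem.Str.join ", " flags] else []) ++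
        ["TURNS: " ++ PySem.Int.toStr history.length]
      PySem.Str.join " | " parts

-- ===== PRECONDITION & SPEC =====
-- does some turn's lowercased 'user' answer contain k1 or k2?
def pvHit (dh : List (List (String × String))) (k1 k2 : String) : Bool :=
  dh.any (fun turn =>
    PySem.Str.isIn k1 (PySem.Str.lower ((PySem.Dict.mk turn).getD "user" "")) ||
    PySem.Str.isIn k2 (PySem.Str.lower ((PySem.Dict.mk turn).getD "user" "")))

def pvPreB (context : List (String × List (List (String × String)))) : Bool :=
  match (PySem.Dict.mk context).get? "dialogue_history" with
  | none => true
  | some dh =>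
    dh.length ≤ 2 ||
    (((([pvHit dh "authorize" "confirm", pvHit dh "investment" "return",
         pvHit dh "romance" "relationship", pvHit dh "tech support" "computer"].filter id).length ≤ 1) : Bool) &&
     ((([pvHit dh "scam" "fraud", pvHit dh "pressure" "urgent",
         pvHit dh "unknown" "stranger"].filter id).length ≤ 1) : Bool))

-- Pre_ excludes dialogues longer than 2 turns that trigger two or more DISTINCT fact messages
-- or two or more DISTINCT red-flag messages: there A's ', '.join(set(...)) emits them in
-- hash-randomized set order, an accident of A's implementation no port can pin down.
def Pre_build_dialogue_summary_py (context : List (String × List (List (String × String)))) : Prop :=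
  pvPreB context = true
instance (context : List (String × List (List (String × String)))) : Decidable (Pre_build_dialogue_summary_py context) := by unfold Pre_build_dialogue_summary_py; infer_instance

def pvWitness_build_dialogue_summary_py : (List (String × List (List (String × String)))) :=
  [("dialogue_history", [[("question", "How did you pay?"), ("user", "by card")],
                         [("question", "When?"), ("user", "yesterday")],
                         [("user", "not sure")]])]

def Spec_build_dialogue_summary_py (context : List (String × List (List (String × String)))) (out : String) : Prop := out = build_dialogue_summary_py_alt context
instance (context : List (String × List (List (String × String)))) (out : String) : Decidable (Spec_build_dialogue_summary_py context out) := by unfold Spec_build_dialogue_summary_py; infer_instance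

-- ===== CLAIM (what is proved, stated in full; the proofs are below) =====
def Claim_equal_build_dialogue_summary_py : Prop := ∀ (context : List (String × List (List (String × String)))), Dom_build_dialogue_summary_py context → Pre_build_dialogue_summary_py context → Spec_build_dialogue_summary_py context (build_dialogue_summary_py context)

-- ===== LEMMAS AND PROOFS =====
-- the lowercased answer of a turn; whether one rule fires on one turn
def pvAns (turn : List (String × String)) : String :=
  PySem.Str.lower ((PySem.Dict.mk turn).getD "user" "")

def pvFires (r : List String × String) (t : List (String × String)) : Bool :=
  r.1.any (fun k => PySem.Str.isIn k (pvAns t))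

-- the messages of a rule bucket contributed by ONE turn of A's loop, in rule order
def pvTurnMsgs (rules : List (List String × String)) (t : List (String × String)) : List String :=
  rules.flatMap (fun r => if pvFires r t then [r.2] else [])

lemma pvFlatMapCongr {T U : Type} (l : List T) (f g : T → List U)
    (h : ∀ t ∈ l, f t = g t) : l.flatMap f = l.flatMap g := by
  induction l with
  | nil => rfl
  | cons x r ih =>
    simp only [List.flatMap_cons, h x (by simp), ih (fun t ht => h t (by simp [ht]))]

lemma pvStepA_eq (f g : List String) (t : List (String × String)) :
    pvStepA (f, g) t = (f ++ pvTurnMsgs pvFactRules t, g ++ pvTurnMsgs pvFlagRules t) := by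
  unfold pvStepA pvTurnMsgs pvFactRules pvFlagRules pvFires pvAns
  simp only [List.flatMap_cons, List.flatMap_nil, List.any_cons, List.any_nil, Bool.or_false]
  generalize (PySem.Str.isIn "authorize" _ || PySem.Str.isIn "confirm" _) = c1
  generalize (PySem.Str.isIn "scam" _ || PySem.Str.isIn "fraud" _) = c2
  generalize (PySem.Str.isIn "pressure" _ || PySem.Str.isIn "urgent" _) = c3
  generalize (PySem.Str.isIn "unknown" _ || PySem.Str.isIn "stranger" _) = c4
  generalize (PySem.Str.isIn "investment" _ || PySem.Str.isIn "return" _) = c5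
  generalize (PySem.Str.isIn "romance" _ || PySem.Str.isIn "relationship" _) = c6
  generalize (PySem.Str.isIn "tech support" _ || PySem.Str.isIn "computer" _) = c7
  cases c1 <;> cases c2 <;> cases c3 <;> cases c4 <;> cases c5 <;> cases c6 <;> cases c7 <;> simp

lemma pvFoldlA (dh : List (List (String × String))) : ∀ f g : List String,
    dh.foldl pvStepA (f, g) = (f ++ dh.flatMap (pvTurnMsgs pvFactRules), g ++ dh.flatMap (pvTurnMsgs pvFlagRules)) := by
  induction dh with
  | nil => intro f g; simp
  | cons t rest ih =>
    intro f g
    simp only [List.foldl_cons, pvStepA_eq, ih, List.flatMap_cons, List.append_assoc]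

-- a nonempty list all of whose elements are m has set {m}
lemma ofList_const (m : String) : ∀ l : List String, l ≠ [] → (∀ x ∈ l, x = m) →
    PySem.Set.ofList l = [m] := by
  have step : ∀ l : List String, (∀ x ∈ l, x = m) → l.foldl PySem.Set.add [m] = [m] := by
    intro l
    induction l with
    | nil => intro _; rfl
    | cons x r ih =>
      intro h
      have hx : x = m := h x (by simp)
      have hadd : PySem.Set.add [m] x = [m] := by
        subst hx; simp [PySem.Set.add, PySem.Set.contains]
      simp only [List.foldl_cons, hadd]
      exact ih (fun y hy => h y (by simp [hy]))
  intro l hne hall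
  cases l with
  | nil => exact absurd rfl hne
  | cons x r =>
    have hx : x = m := hall x (by simp)
    show (x :: r).foldl PySem.Set.add [] = [m]
    simp only [List.foldl_cons]
    have hadd : PySem.Set.add [] x = [m] := by subst hx; rfl
    rw [hadd]
    exact step r (fun y hy => hall y (by simp [hy]))

lemma ofList_flatMap_if {T : Type} (dh : List T) (p : T → Bool) (m : String)
    (h : dh.any p = true) :
    PySem.Set.ofList (dh.flatMap (fun t => if p t then [m] else [])) = [m] := by
  obtain ⟨t, ht, hp⟩ := List.any_eq_true.mp h
  apply ofList_const
  · intro hnil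
    have hm : m ∈ dh.flatMap (fun t => if p t then [m] else []) := by
      refine List.mem_flatMap.mpr ⟨t, ht, ?_⟩
      simp [hp]
    simp [hnil] at hm
  · intro x hx
    obtain ⟨u, _, hu⟩ := List.mem_flatMap.mp hx
    by_cases hpu : p u <;> simp [hpu] at hu
    exact hu

lemma set_ofList_ne_nil (l : List String) (h : l ≠ []) : PySem.Set.ofList l ≠ [] := by
  cases l with
  | nil => exact absurd rfl h
  | cons x r =>
    intro hc
    have hm : x ∈ PySem.Set.ofList (x :: r) := (PySem.Set.mem_ofList _ _).mpr (by simp)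
    simp [hc] at hm

lemma any_map_ans (dh : List (List (String × String))) (r : List String × String) :
    ((dh.map pvAns).any (fun a => r.1.any (fun k => PySem.Str.isIn k a))) = dh.any (pvFires r) := by
  rw [List.any_map]; rfl

lemma pvFired_cons (r : List String × String) (rs : List (List String × String)) (answers : List String) :
    pvFired (r :: rs) answers =
      (if answers.any (fun a => r.1.any (fun k => PySem.Str.isIn k a)) then [r.2] else []) ++ pvFired rs answers := by
  rw [pvFired, List.filter_cons]
  cases h : answers.any (fun a => r.1.any (fun k => PySem.Str.isIn k a)) <;> simp [pvFired, h]

-- generic bucket lemma: if at most one rule of the bucket fires anywhere in the dialogue,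
-- set(A's turn-major appended list) equals B's rule-major fired list
lemma bucket_gen (dh : List (List (String × String))) :
    ∀ rules : List (List String × String),
    ((rules.map (fun r => dh.any (pvFires r))).filter id).length ≤ 1 →
    PySem.Set.ofList (dh.flatMap (pvTurnMsgs rules)) = pvFired rules (dh.map pvAns) := by
  intro rules
  induction rules with
  | nil =>
    intro _
    have hmap : dh.flatMap (pvTurnMsgs []) = [] := by simp [pvTurnMsgs]
    rw [hmap]; rfl
  | cons r rs ih =>
    intro h
    have hhead : ((dh.map pvAns).any (fun a => r.1.any (fun k => PySem.Str.isIn k a))) = dh.any (pvFires r) :=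
      any_map_ans dh r
    cases hb : dh.any (pvFires r) with
    | false =>
      have h' : ((rs.map (fun r => dh.any (pvFires r))).filter id).length ≤ 1 := by
        simpa [List.filter_cons, hb] using h
      have hcongr : dh.flatMap (pvTurnMsgs (r :: rs)) = dh.flatMap (pvTurnMsgs rs) := by
        apply pvFlatMapCongr
        intro t ht
        have hft : pvFires r t = false := by simpa using List.any_eq_false.mp hb t ht
        simp [pvTurnMsgs, hft]
      rw [hcongr, ih h', pvFired_cons, any_map_ans, hb]
      simp
    | true =>
      have hzero : ((rs.map (fun r => dh.any (pvFires r))).filter id) = [] := by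
        have hlen := h
        simp only [List.map_cons, List.filter_cons, hb, id_eq, if_true, List.length_cons] at hlen
        exact List.length_eq_zero_iff.mp (by omega)
      have hall : ∀ r' ∈ rs, dh.any (pvFires r') = false := by
        intro r' hr'
        have hmem : dh.any (pvFires r') ∈ rs.map (fun r => dh.any (pvFires r)) :=
          List.mem_map.mpr ⟨r', hr', rfl⟩
        have := List.filter_eq_nil_iff.mp hzero _ hmem
        simpa using this
      have hcongr : dh.flatMap (pvTurnMsgs (r :: rs)) =
          dh.flatMap (fun t => if pvFires r t then [r.2] else []) := by
        apply pvFlatMapCongr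
        intro t ht
        have htail : rs.flatMap (fun r' => if pvFires r' t then [r'.2] else []) = [] := by
          rw [List.flatMap_eq_nil_iff]
          intro r' hr'
          have hft : pvFires r' t = false := by simpa using List.any_eq_false.mp (hall r' hr') t ht
          simp [hft]
        simp [pvTurnMsgs, htail]
      rw [hcongr, ofList_flatMap_if dh _ _ hb]
      have htl : pvFired rs (dh.map pvAns) = [] := by
        rw [pvFired, List.map_eq_nil_iff, List.filter_eq_nil_iff]
        intro r' hr'
        rw [any_map_ans dh r', hall r' hr']
        simp
      rw [pvFired_cons, any_map_ans, hb, htl]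
      simp

-- the Pre_ hit lists are the generic ones
lemma pvHit_as_any (dh : List (List (String × String))) (k1 k2 : String) (m : String) :
    pvHit dh k1 k2 = dh.any (pvFires ([k1, k2], m)) := by
  unfold pvHit pvFires pvAns
  simp [Bool.or_false]

theorem build_dialogue_summary_py_aux (context : List (String × List (List (String × String))))
    (hpre : Pre_build_dialogue_summary_py context) :
    build_dialogue_summary_py context = build_dialogue_summary_py_alt context := by
  unfold Pre_build_dialogue_summary_py pvPreB at hpre
  unfold build_dialogue_summary_py build_dialogue_summary_py_alt
  cases hget : (PySem.Dict.mk context).get? "dialogue_history" with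
  | none => rfl
  | some dh =>
    rw [hget] at hpre
    by_cases h0 : dh.length = 0
    · simp [h0]
    · by_cases h2 : dh.length ≤ 2
      · simp [h0, h2]
      · simp only [h0, h2, if_false, decide_eq_true_eq]
        have hFG : (decide ((List.filter id [pvHit dh "authorize" "confirm", pvHit dh "investment" "return",
              pvHit dh "romance" "relationship", pvHit dh "tech support" "computer"]).length ≤ 1) &&
            decide ((List.filter id [pvHit dh "scam" "fraud", pvHit dh "pressure" "urgent",
              pvHit dh "unknown" "stranger"]).length ≤ 1)) = true := by
          rcases Bool.or_eq_true_iff.mp hpre with hl | hr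
          · exact absurd (by simpa using hl) h2
          · exact hr
        obtain ⟨hF, hG⟩ := Bool.and_eq_true_iff.mp hFG
        have hFle : ((pvFactRules.map (fun r => dh.any (pvFires r))).filter id).length ≤ 1 := by
          have := of_decide_eq_true hF
          simpa [pvFactRules, pvHit_as_any dh "authorize" "confirm" "Customer authorized transaction",
                 pvHit_as_any dh "investment" "return" "Investment-related transaction",
                 pvHit_as_any dh "romance" "relationship" "Romance/relationship context",
                 pvHit_as_any dh "tech support" "computer" "Tech support scenario"] using this
        have hGle : ((pvFlagRules.map (fun r => dh.any (pvFires r))).filter id).length ≤ 1 := by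
          have := of_decide_eq_true hG
          simpa [pvFlagRules, pvHit_as_any dh "scam" "fraud" "Customer mentioned scam/fraud",
                 pvHit_as_any dh "pressure" "urgent" "Pressure/urgency tactics detected",
                 pvHit_as_any dh "unknown" "stranger" "Unknown/stranger relationship"] using this
        have hFeq := bucket_gen dh pvFactRules hFle
        have hGeq := bucket_gen dh pvFlagRules hGle
        have hFne : (dh.flatMap (pvTurnMsgs pvFactRules) ≠ []) ↔ (pvFired pvFactRules (dh.map pvAns) ≠ []) := by
          constructor
          · intro hne
            rw [← hFeq]
            exact set_ofList_ne_nil _ hne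
          · intro hne hnil
            rw [hnil] at hFeq
            exact hne hFeq.symm
        have hGne : (dh.flatMap (pvTurnMsgs pvFlagRules) ≠ []) ↔ (pvFired pvFlagRules (dh.map pvAns) ≠ []) := by
          constructor
          · intro hne
            rw [← hGeq]
            exact set_ofList_ne_nil _ hne
          · intro hne hnil
            rw [hnil] at hGeq
            exact hne hGeq.symm
        simp only [pvFoldlA, List.nil_append, hFeq, hGeq]
        have hfold : (fun t : List (String × String) => PySem.Str.lower ((PySem.Dict.mk t).getD "user" "")) = pvAns := rfl
        rw [hfold]
        by_cases hf : pvFired pvFactRules (dh.map pvAns) = [] <;>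
          by_cases hg : pvFired pvFlagRules (dh.map pvAns) = [] <;>
            simp [hf, hg, hFne, hGne]

-- ===== VERDICT (by name: the statement is the Claim_ definition above) =====
theorem build_dialogue_summary_py_spec : Claim_equal_build_dialogue_summary_py := by
  intro context _ hpre
  unfold Spec_build_dialogue_summary_py
  exact build_dialogue_summary_py_aux context hpre
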